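-- pv_equiv track=rewrite | github.com/Pritz69/GFG_POTD | Difficulty: Medium/Lexicographically Largest String After K Deletions/lexicographically-largest-string-after-k-deletions.py | maxSubseq
-- ===== SOURCE A (Python) =====
-- def maxSubseq(s, k):
--     #code here
--     stack = []
--     n, cnt = len(s), 0
--     for c in s:
--         while stack and cnt < k and stack[-1] < c:
--             stack.pop()
--             cnt +=1
--         stack.append(c)
--     while len(stack) > n - k:
--         stack.pop()
--
--     return ''.join(stack)
-- ===== SOURCE B (Python) =====
-- def maxSubseq(s, k):
--     # k rounds, each deleting the first character that is smaller than its
--     # successor (or the last character if the string is non-increasing).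
--     t = list(s)
--     r = k
--     while r > 0:
--         i = 0
--         while i + 1 < len(t) and t[i] >= t[i + 1]:
--             i += 1
--         del t[i]
--         r -= 1
--     return ''.join(t)
-- ===== Notes on version B (the rewrite author's own statement) =====
-- stated objective: alternative
-- what changed: Replaces A's single-pass bounded stack (push each char, pop smaller predecessors while budget remains, then truncate) by k independent deletion rounds, each scanning for the first ascent and deleting that character.
import Mathlib
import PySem

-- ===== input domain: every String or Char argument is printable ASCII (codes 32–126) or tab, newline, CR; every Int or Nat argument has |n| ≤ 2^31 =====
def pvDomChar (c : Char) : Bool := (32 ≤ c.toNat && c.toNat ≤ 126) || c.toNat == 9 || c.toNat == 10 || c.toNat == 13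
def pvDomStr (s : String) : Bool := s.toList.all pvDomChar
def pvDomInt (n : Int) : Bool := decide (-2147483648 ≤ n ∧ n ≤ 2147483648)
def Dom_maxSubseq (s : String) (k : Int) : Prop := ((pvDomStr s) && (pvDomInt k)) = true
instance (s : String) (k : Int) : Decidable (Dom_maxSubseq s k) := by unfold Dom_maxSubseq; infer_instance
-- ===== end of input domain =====

-- B replaces A's one-pass budgeted stack by k rounds that each delete the first ascent
-- character; same return value on the stated domain (objective: alternative decomposition).

-- ===== PORT A =====
-- the inner `while stack and cnt < k and stack[-1] < c` loop; the stack is kept reversed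
-- (head = Python's stack[-1]); returns the popped stack and the updated cnt
def popA (k : Int) (c : Char) : List Char → Int → List Char × Int
  | [], cnt => ([], cnt)
  | t :: rest, cnt =>
    if cnt < k ∧ t < c then popA k c rest (cnt + 1) else (t :: rest, cnt)

-- one iteration of A's `for c in s` loop over the state (stack, cnt)
def stepA (k : Int) (st : List Char × Int) (c : Char) : List Char × Int :=
  let p := popA k c st.1 st.2
  (c :: p.1, p.2)

-- A's final `while len(stack) > n - k: stack.pop()` (stack reversed: pop = drop head)
def truncA (m : Int) : List Char → List Char
  | [] => []
  | c :: r => if m < ((c :: r).length : Int) then truncA m r else c :: r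

def maxSubseq (s : String) (k : Int) : String :=
  let l := s.toList
  let n : Int := l.length
  let res := List.foldl (stepA k) ([], 0) l
  String.mk (truncA (n - k) res.1).reverse

-- ===== PORT B =====
-- Source B's inner scan: first index i with not (t[i] >= t[i+1]); len-1 if non-increasing
def scanB : List Char → Nat
  | a :: b :: r => if b ≤ a then scanB (b :: r) + 1 else 0
  | _ => 0

-- Source B's outer `while r > 0` loop (r iterations; each deletes index scanB t)
def bLoop : Nat → List Char → List Char
  | 0, t => t
  | r + 1, t => bLoop r (t.eraseIdx (scanB t))

def maxSubseq_alt (s : String) (k : Int) : String :=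
  String.mk (bLoop k.toNat s.toList)

-- ===== PRECONDITION & SPEC =====
-- Pre_ excludes exactly k > len(s), where Python A raises IndexError (pop from an empty list).
def Pre_maxSubseq (s : String) (k : Int) : Prop := k ≤ (s.toList.length : Int)
instance (s : String) (k : Int) : Decidable (Pre_maxSubseq s k) := by unfold Pre_maxSubseq; infer_instance
def pvWitness_maxSubseq : String × Int := ("bcab", 2)

def Spec_maxSubseq (s : String) (k : Int) (out : String) : Prop := out = maxSubseq_alt s k
instance (s : String) (k : Int) (out : String) : Decidable (Spec_maxSubseq s k out) := by unfold Spec_maxSubseq; infer_instance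

-- ===== CLAIM (what is proved, stated in full; the proofs are below) =====
def Claim_equal_maxSubseq : Prop := ∀ (s : String) (k : Int), Dom_maxSubseq s k → Pre_maxSubseq s k → Spec_maxSubseq s k (maxSubseq s k)

-- ===== LEMMAS AND PROOFS =====

-- with an exhausted budget (k ≤ cnt) A's fold only pushes
lemma fold_noBudget (k : Int) : ∀ (l : List Char) (stk : List Char) (cnt : Int), k ≤ cnt →
    List.foldl (stepA k) (stk, cnt) l = (l.reverse ++ stk, cnt) := by
  intro l
  induction l with
  | nil => intro stk cnt h; simp
  | cons c r ih =>
    intro stk cnt h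
    have hp : popA k c stk cnt = (stk, cnt) := by
      cases stk with
      | nil => rfl
      | cons t rest => simp [popA]; intro hlt; omega
    simp [stepA, hp, ih (c :: stk) cnt h, List.append_assoc]

-- over a non-increasing run the stack only grows (the pop guard `stack[-1] < c` never fires)
lemma fold_chain (k : Int) : ∀ (l : List Char) (a : Char) (stk : List Char) (cnt : Int),
    List.IsChain (fun x y => ¬ x < y) (a :: l) →
    List.foldl (stepA k) (a :: stk, cnt) l = (l.reverse ++ a :: stk, cnt) := by
  intro l
  induction l with
  | nil => intro a stk cnt _; simp
  | cons c r ih =>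
    intro a stk cnt hch
    rcases List.isChain_cons.mp hch with ⟨hh, hcr⟩
    have hac : ¬ a < c := hh c (by simp)
    have hp : popA k c (a :: stk) cnt = (a :: stk, cnt) := by
      simp only [popA]
      exact if_neg (fun h => hac h.2)
    simp only [List.foldl_cons, stepA, hp]
    rw [ih c (a :: stk) cnt hcr]
    simp [List.append_assoc]

lemma fold_chain0 (k : Int) (l : List Char) (h : List.IsChain (fun x y => ¬ x < y) l) :
    List.foldl (stepA k) ([], 0) l = (l.reverse, 0) := by
  cases l with
  | nil => rfl
  | cons a q =>
    have h1 : stepA k ([], 0) a = ([a], 0) := by simp [stepA, popA]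
    simp only [List.foldl_cons, h1]
    rw [fold_chain k q a [] 0 h]
    simp

-- budget-shift for the inner pop loop
lemma pop_shift (k : Int) (c : Char) : ∀ (stk : List Char) (cnt : Int),
    popA k c stk (cnt + 1) = ((popA (k - 1) c stk cnt).1, (popA (k - 1) c stk cnt).2 + 1) := by
  intro stk
  induction stk with
  | nil => intro cnt; simp [popA]
  | cons t rest ih =>
    intro cnt
    simp only [popA]
    by_cases h : cnt < k - 1 ∧ t < c
    · rw [if_pos ⟨by omega, h.2⟩, if_pos h, ih (cnt + 1)]
    · have : ¬ (cnt + 1 < k ∧ t < c) := by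
        intro ⟨h1, h2⟩; exact h ⟨by omega, h2⟩
      rw [if_neg this, if_neg h]

-- budget-shift for the whole fold
lemma fold_shift (k : Int) : ∀ (l : List Char) (stk : List Char) (cnt : Int),
    List.foldl (stepA k) (stk, cnt + 1) l
      = ((List.foldl (stepA (k - 1)) (stk, cnt) l).1,
         (List.foldl (stepA (k - 1)) (stk, cnt) l).2 + 1) := by
  intro l
  induction l with
  | nil => intro stk cnt; simp
  | cons c r ih =>
    intro stk cnt
    simp only [List.foldl_cons, stepA, pop_shift]
    exact ih _ _

-- the final truncation drops elements while the length exceeds the target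
lemma truncA_of_le (m : Int) (xs : List Char) (h : (xs.length : Int) ≤ m) : truncA m xs = xs := by
  cases xs with
  | nil => rfl
  | cons c r => simp only [truncA]; rw [if_neg (by push_cast; omega)]

lemma truncA_cons (m : Int) (c : Char) (r : List Char) (h : m < ((c :: r).length : Int)) :
    truncA m (c :: r) = truncA m r := by
  simp only [truncA]; rw [if_pos h]

-- the scan index is always in range
lemma scanB_lt : ∀ (l : List Char), l ≠ [] → scanB l < l.length := by
  intro l
  induction l with
  | nil => intro h; exact absurd rfl h
  | cons a r ih =>
    intro _
    cases r with
    | nil => simp [scanB]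
    | cons b q =>
      simp only [scanB]
      split
      · have := ih (by simp); simpa using Nat.succ_lt_succ this
      · simp

-- shape of a list around its first ascent (or none)
lemma decomp : ∀ (l : List Char), l ≠ [] →
    (List.IsChain (fun x y => ¬ x < y) l ∧ scanB l = l.length - 1) ∨
    (∃ p b c rest, l = p ++ b :: c :: rest ∧
      List.IsChain (fun x y => ¬ x < y) (p ++ [b]) ∧ b < c ∧ scanB l = p.length) := by
  intro l
  induction l with
  | nil => intro h; exact absurd rfl h
  | cons a r ih =>
    intro _
    cases r with
    | nil => left; exact ⟨List.isChain_singleton a, by simp [scanB]⟩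
    | cons b q =>
      by_cases hab : b ≤ a
      · rcases ih (by simp) with ⟨hch, hsc⟩ | ⟨p, b', c, rest, heq, hch, hbc, hsc⟩
        · left
          constructor
          · exact List.isChain_cons.mpr
              ⟨by intro y hy; simp at hy; rw [← hy]; exact not_lt.mpr hab, hch⟩
          · simp only [scanB, if_pos hab, hsc, List.length_cons]
            omega
        · right
          refine ⟨a :: p, b', c, rest, by simp [heq], ?_, hbc, ?_⟩
          · rw [show (a :: p) ++ [b'] = a :: (p ++ [b']) from rfl]
            refine List.isChain_cons.mpr ⟨?_, hch⟩
            intro y hy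
            cases p with
            | nil =>
              simp only [List.nil_append] at heq hy
              have hb : b = b' := by injection heq
              simp only [List.head?_cons, Option.mem_def, Option.some.injEq] at hy
              rw [← hy, ← hb]
              exact not_lt.mpr hab
            | cons x xs =>
              have hx : b = x := by
                simp only [List.cons_append] at heq
                injection heq
              simp only [List.cons_append, List.head?_cons, Option.mem_def,
                Option.some.injEq] at hy
              rw [← hy, ← hx]
              exact not_lt.mpr hab
          · simp [scanB, hab, hsc]
      · right
        refine ⟨[], a, b, q, by simp, List.isChain_singleton a, not_le.mp hab, ?_⟩
        simp [scanB, hab]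

-- deleting the last element
lemma eraseIdx_last : ∀ (l : List Char), l.eraseIdx (l.length - 1) = l.dropLast := by
  intro l
  induction l with
  | nil => rfl
  | cons a r ih =>
    cases r with
    | nil => rfl
    | cons b q =>
      simp only [List.length_cons, Nat.add_sub_cancel, List.eraseIdx_cons_succ, List.dropLast]
      have := ih
      simp only [List.length_cons, Nat.add_sub_cancel] at this
      rw [this]

lemma eraseIdx_mid (b : Char) : ∀ (p rest : List Char),
    (p ++ b :: rest).eraseIdx p.length = p ++ rest := by
  intro p
  induction p with
  | nil => intro rest; rfl
  | cons x xs ih => intro rest; simp [List.eraseIdx_cons_succ, ih]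

-- one deletion round of B equals lowering A's budget by one (the simulation step)
lemma sim (l : List Char) (k : Int) (hk1 : 1 ≤ k) (hkn : k ≤ (l.length : Int)) :
    truncA ((l.length : Int) - k) (List.foldl (stepA k) ([], 0) l).1
      = truncA (((l.eraseIdx (scanB l)).length : Int) - (k - 1))
          (List.foldl (stepA (k - 1)) ([], 0) (l.eraseIdx (scanB l))).1 := by
  have hne : l ≠ [] := by
    intro h; rw [h] at hkn; simp at hkn; omega
  rcases decomp l hne with ⟨hch, hsc⟩ | ⟨p, b, c, rest, heq, hch, hbc, hsc⟩
  · -- non-increasing: B drops the last element, A's truncation drops one fewer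
    rw [hsc, eraseIdx_last, fold_chain0 k l hch,
        fold_chain0 (k - 1) l.dropLast hch.dropLast]
    have hrev : l.dropLast.reverse = l.reverse.tail := by
      rw [List.tail_reverse]
    have hlen : l.dropLast.length = l.length - 1 := List.length_dropLast
    have hlpos : 1 ≤ l.length := List.length_pos_iff.mpr hne
    have harg : ((l.dropLast.length : Int)) - (k - 1) = (l.length : Int) - k := by
      rw [hlen]; push_cast; omega
    rw [hrev, harg]
    cases hrl : l.reverse with
    | nil => exfalso; exact hne (by simpa using congrArg List.reverse hrl)
    | cons x xs =>
      rw [truncA_cons]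
      · rfl
      · have : (x :: xs).length = l.length := by rw [← hrl]; simp
        rw [this]; omega
  · -- first ascent at index p.length: pop b on the A side, delete b on the B side
    rw [hsc, heq, eraseIdx_mid]
    have hchp : List.IsChain (fun x y => ¬ x < y) p := hch.left_of_append
    -- A side: fold over p ++ [b] gives stack b :: p.reverse
    have hA1 : List.foldl (stepA k) ([], 0) (p ++ [b]) = (b :: p.reverse, 0) := by
      rw [fold_chain0 k (p ++ [b]) hch]; simp
    have hA : List.foldl (stepA k) ([], 0) (p ++ b :: c :: rest)
        = List.foldl (stepA k) (stepA k (b :: p.reverse, 0) c) rest := by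
      rw [show p ++ b :: c :: rest = (p ++ [b]) ++ c :: rest by simp]
      rw [List.foldl_append, hA1]
      rfl
    have hB : List.foldl (stepA (k - 1)) ([], 0) (p ++ c :: rest)
        = List.foldl (stepA (k - 1)) (stepA (k - 1) (p.reverse, 0) c) rest := by
      rw [show p ++ c :: rest = p ++ c :: rest from rfl]
      cases p with
      | nil => rfl
      | cons x xs =>
        rw [show (x :: xs) ++ c :: rest = ((x :: xs) ++ []) ++ c :: rest by simp]
        rw [List.foldl_append, show ((x :: xs) : List Char) ++ [] = x :: xs by simp,
            fold_chain0 (k - 1) (x :: xs) hchp]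
        rfl
    -- relate the two states after consuming c
    have hstep : stepA k (b :: p.reverse, 0) c
        = ((stepA (k - 1) (p.reverse, 0) c).1, (stepA (k - 1) (p.reverse, 0) c).2 + 1) := by
      simp only [stepA, popA]
      rw [if_pos ⟨by omega, hbc⟩]
      rw [pop_shift k c p.reverse 0]
    rw [hA, hB, hstep]
    rw [show ((stepA (k-1) (p.reverse, 0) c).1, (stepA (k-1) (p.reverse, 0) c).2 + 1)
          = (((stepA (k-1) (p.reverse, 0) c).1, (stepA (k-1) (p.reverse, 0) c).2).1,
             ((stepA (k-1) (p.reverse, 0) c).1, (stepA (k-1) (p.reverse, 0) c).2).2 + 1) from rfl]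
    rw [fold_shift (k) rest _ _]
    have harg : ((p ++ b :: c :: rest).length : Int) - k
        = ((p ++ c :: rest).length : Int) - (k - 1) := by
      simp; push_cast; omega
    rw [harg]

-- the main list-level equivalence, by induction on the number of deletion rounds
lemma main_list : ∀ (kn : Nat) (k : Int) (l : List Char), k.toNat = kn →
    k ≤ (l.length : Int) →
    (truncA ((l.length : Int) - k) (List.foldl (stepA k) ([], 0) l).1).reverse = bLoop kn l := by
  intro kn
  induction kn with
  | zero =>
    intro k l hkt hkn
    have hk0 : k ≤ 0 := by omega
    rw [fold_noBudget k l [] 0 hk0]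
    simp only [List.append_nil]
    rw [truncA_of_le _ _ (by simp; omega)]
    simp [bLoop]
  | succ kn ih =>
    intro k l hkt hkn
    have hk1 : 1 ≤ k := by omega
    rw [sim l k hk1 hkn]
    have hlt := scanB_lt l (by intro h; rw [h] at hkn; simp at hkn; omega)
    have hlen : (l.eraseIdx (scanB l)).length = l.length - 1 := by
      rw [List.length_eraseIdx_of_lt hlt]
    rw [ih (k - 1) _ (by omega) (by rw [hlen]; push_cast [Nat.cast_sub (by omega : 1 ≤ l.length)]; omega)]
    rfl

-- ===== VERDICT (by name: the statement is the Claim_ definition above) =====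
theorem maxSubseq_spec : Claim_equal_maxSubseq := by
  intro s k _ hpre
  unfold Spec_maxSubseq maxSubseq maxSubseq_alt
  simp only []
  rw [main_list k.toNat k s.toList rfl hpre]
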